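-- pv_equiv track=rewrite | github.com/Kimbumsoo99/Code_Test | baekjoon/4673.py | notSelfNum
-- ===== SOURCE A (Python) =====
-- def notSelfNum(current_num):
--     value = current_num
--     while current_num > 0:
--         value += current_num % 10
--         current_num //= 10
--     if value < 10001:
--         return value
--     else:
--         return
-- ===== SOURCE B (Python) =====
-- def notSelfNum(current_num):
--     value = current_num
--     if current_num > 0:
--         value += sum(ord(c) - 48 for c in str(current_num))
--     if value < 10001:
--         return value
--     return None
-- ===== Notes on version B (the rewrite author's own statement) =====
-- stated objective: idiomatic
-- what changed: B computes the digit sum from the decimal string representation (str + ord per character) instead of A's arithmetic while-loop of repeated modulus and floor division.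
import Mathlib
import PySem

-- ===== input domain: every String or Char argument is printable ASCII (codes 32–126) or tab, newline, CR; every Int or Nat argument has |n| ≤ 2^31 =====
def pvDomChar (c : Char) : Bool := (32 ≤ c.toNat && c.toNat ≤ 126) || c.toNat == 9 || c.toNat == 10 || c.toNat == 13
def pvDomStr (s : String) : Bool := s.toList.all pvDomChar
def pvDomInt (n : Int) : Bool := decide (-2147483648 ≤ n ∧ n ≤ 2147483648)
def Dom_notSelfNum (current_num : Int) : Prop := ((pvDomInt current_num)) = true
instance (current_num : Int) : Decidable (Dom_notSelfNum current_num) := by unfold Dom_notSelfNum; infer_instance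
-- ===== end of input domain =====

-- B computes the digit sum from the decimal string (str + ord per character) instead of A's
-- arithmetic while-loop of repeated modulus and floor division; same cost, more idiomatic decomposition.

-- ===== PORT A =====
-- the 'while current_num > 0' loop of A, state = (current_num, value)
def notSelfNumLoop (current_num value : Int) : Int :=
  if current_num > 0 then
    notSelfNumLoop (PySem.Int.floordiv current_num 10) (value + PySem.Int.mod current_num 10)
  else value
termination_by current_num.toNat
decreasing_by
  rw [PySem.Int.floordiv_eq_ediv_of_pos (by norm_num : (0:Int) < 10)]
  omega

def notSelfNum (current_num : Int) : Option Int :=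
  let value := notSelfNumLoop current_num current_num
  if value < 10001 then some value else none

-- ===== PORT B =====
def notSelfNum_alt (current_num : Int) : Option Int :=
  let value := current_num
  let value := if current_num > 0 then
      value + ((PySem.Int.toChars current_num).map (fun c => (c.toNat : Int) - 48)).sum
    else value
  if value < 10001 then some value else none

-- ===== PRECONDITION & SPEC =====
def Spec_notSelfNum (current_num : Int) (out : Option Int) : Prop := out = notSelfNum_alt current_num
instance (current_num : Int) (out : Option Int) : Decidable (Spec_notSelfNum current_num out) := by unfold Spec_notSelfNum; infer_instance

-- ===== CLAIM (what is proved, stated in full; the proofs are below) =====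
def Claim_equal_notSelfNum : Prop := ∀ (current_num : Int), Dom_notSelfNum current_num → Spec_notSelfNum current_num (notSelfNum current_num)

-- ===== LEMMAS AND PROOFS =====

-- arithmetic decimal digit sum, the common reference value
def dsN (n : Nat) : Nat :=
  if n = 0 then 0 else n % 10 + dsN (n / 10)
decreasing_by exact Nat.div_lt_self (by omega) (by norm_num)

theorem dsN_zero : dsN 0 = 0 := by rw [dsN]; rfl

theorem dsN_lt_ten (n : Nat) (h : n < 10) : dsN n = n := by
  rw [dsN]
  rcases Nat.eq_zero_or_pos n with h0 | h0
  · simp [h0]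
  · rw [if_neg (by omega), Nat.div_eq_of_lt h, dsN_zero]
    omega

theorem digitChar_val (d : Nat) (h : d < 10) :
    ((Nat.digitChar d).toNat : Int) - 48 = (d : Int) := by
  interval_cases d <;> decide

theorem sum_toDigitsCore (f : Nat) : ∀ (n : Nat) (ds : List Char), n < f →
    ((Nat.toDigitsCore 10 f n ds).map (fun c => (c.toNat : Int) - 48)).sum
      = (dsN n : Int) + (ds.map (fun c => (c.toNat : Int) - 48)).sum := by
  induction f with
  | zero => intro n ds h; omega
  | succ f ih =>
    intro n ds h
    rw [Nat.toDigitsCore]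
    by_cases hx : n / 10 = 0
    · rw [if_pos hx]
      simp only [List.map_cons, List.sum_cons,
        digitChar_val (n % 10) (by omega : n % 10 < 10)]
      rw [dsN_lt_ten n (by omega)]
      have hm : n % 10 = n := by omega
      rw [hm]
    · rw [if_neg hx, ih (n / 10) _ (by have := Nat.div_lt_self (by omega : 0 < n) (by norm_num : 1 < 10); omega)]
      conv_rhs => rw [dsN]
      rw [if_neg (by omega : ¬ n = 0)]
      simp only [List.map_cons, List.sum_cons,
        digitChar_val (n % 10) (Nat.mod_lt n (by norm_num))]
      push_cast
      ring

theorem loop_eq : ∀ (k : Nat) (n v : Int), n.toNat ≤ k →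
    notSelfNumLoop n v = v + (dsN n.toNat : Int) := by
  intro k
  induction k with
  | zero =>
    intro n v h
    rw [notSelfNumLoop, if_neg (by omega : ¬ n > 0)]
    have : n.toNat = 0 := by omega
    rw [this, dsN]; simp
  | succ k ih =>
    intro n v h
    rw [notSelfNumLoop]
    by_cases hp : n > 0
    · rw [if_pos hp]
      rw [PySem.Int.floordiv_eq_ediv_of_pos (by norm_num : (0:Int) < 10),
          PySem.Int.mod_eq_emod_of_pos (by norm_num : (0:Int) < 10)]
      rw [ih (n / 10) _ (by omega)]
      have h1 : (n / 10).toNat = n.toNat / 10 := by omega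
      have h2 : n % 10 = ((n.toNat % 10 : Nat) : Int) := by omega
      rw [h1, h2]
      conv_rhs => rw [dsN]
      rw [if_neg (by omega : ¬ n.toNat = 0)]
      push_cast
      ring
    · rw [if_neg hp]
      have : n.toNat = 0 := by omega
      rw [this, dsN]; simp

theorem charsum_eq (n : Int) (hp : n > 0) :
    ((PySem.Int.toChars n).map (fun c => (c.toNat : Int) - 48)).sum = (dsN n.toNat : Int) := by
  rw [PySem.Int.toChars, if_neg (by omega : ¬ n < 0)]
  rw [Nat.toDigits]
  rw [sum_toDigitsCore (n.toNat + 1) n.toNat [] (by omega)]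
  simp

-- ===== VERDICT (by name: the statement is the Claim_ definition above) =====
theorem notSelfNum_spec : Claim_equal_notSelfNum := by
  intro n _
  unfold Spec_notSelfNum notSelfNum notSelfNum_alt
  by_cases hp : n > 0
  · simp only [if_pos hp, loop_eq n.toNat n n le_rfl, charsum_eq n hp]
  · simp only [if_neg hp, loop_eq n.toNat n n le_rfl]
    have h0 : n.toNat = 0 := by omega
    simp only [h0, dsN_zero]
    norm_num
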